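-- pv_equiv track=rewrite | github.com/jbernal1330/ParcialLPT | Parcial LPT/Puntos 1, 2 y 3/Punto1, 2, 3.py | ver_factor_comun
-- ===== SOURCE A (Python) =====
-- def ver_factor_comun(gramatica):
--
--     for no_terminal, producciones in gramatica.items():
--         n = len(producciones)
--         if n > 0:
--             min = len(producciones[0])
--             for produccion in gramatica[no_terminal]:
--                 if len(produccion) < min:
--                     min = len(produccion)
--             if n > 1:
--                 for i in range(0,n):
--                     for j in range(0,n):
--                         factor1 = ''
--                         factor2 = ''
--                         if i != j:
--                             for k in range(0,min):
--                                 factor1 = factor1 + str(gramatica[no_terminal][i][k])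
--                                 factor2 = factor2 + str(gramatica[no_terminal][j][k])
--                                 if factor1 == factor2:
--                                     return True
--     return False
-- ===== SOURCE B (Python) =====
-- def ver_factor_comun(gramatica):
--     for producciones in gramatica.values():
--         if len(producciones) > 1 and all(producciones):
--             seen = set()
--             for p in producciones:
--                 if p[0] in seen:
--                     return True
--                 seen.add(p[0])
--     return False
-- ===== Notes on version B (the rewrite author's own statement) =====
-- stated objective: simpler
-- what changed: A's per-group quadruple loop (all ordered pairs of productions, regrowing and comparing cumulative prefix strings character by character) is replaced by a single pass per group that inserts each production's first character into a set and returns True on the first duplicate, since two productions share a prefix of some length <= min iff they share their first character; the min>0 guard becomes all(producciones).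
import Mathlib
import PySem

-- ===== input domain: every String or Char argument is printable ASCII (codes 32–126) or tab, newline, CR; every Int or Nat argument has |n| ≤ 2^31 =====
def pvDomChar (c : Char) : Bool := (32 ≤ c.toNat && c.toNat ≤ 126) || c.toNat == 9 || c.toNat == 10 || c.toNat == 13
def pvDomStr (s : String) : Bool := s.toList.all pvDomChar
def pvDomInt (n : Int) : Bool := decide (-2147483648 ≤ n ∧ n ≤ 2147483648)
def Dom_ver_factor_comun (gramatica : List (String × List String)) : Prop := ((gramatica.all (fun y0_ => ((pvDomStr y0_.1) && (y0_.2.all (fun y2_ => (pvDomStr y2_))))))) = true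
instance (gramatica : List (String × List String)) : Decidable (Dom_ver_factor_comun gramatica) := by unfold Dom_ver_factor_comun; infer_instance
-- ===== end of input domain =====

-- B (simpler): A's pair-by-pair growing-prefix scan per group is replaced by a single pass
-- that puts each production's first character into a set and stops at the first duplicate
-- (a shared prefix of any length implies a shared first character); no side effects.

-- ===== PORT A =====
-- inner 'for k in range(0, min)' loop: grows factor1/factor2 by one char and compares.
-- Indexing production[k] is ported with getD; k < min ≤ len(production) always holds in A,
-- so the default is never read and the port is exact.
def vfcKLoop (pi pj : List Char) : List Nat → List Char → List Char → Bool
  | [], _, _ => false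
  | k :: ks, f1, f2 =>
    let f1' := f1 ++ [pi.getD k ' ']
    let f2' := f2 ++ [pj.getD k ' ']
    if f1' = f2' then true else vfcKLoop pi pj ks f1' f2'

-- 'for j in range(0, n)' loop (i and j index into the group's production list; both i, j < n)
def vfcJLoop (prods : List (List Char)) (mn i : Nat) : List Nat → Bool
  | [] => false
  | j :: js =>
    if i ≠ j then
      if vfcKLoop (prods.getD i []) (prods.getD j []) (List.range mn) [] [] then true
      else vfcJLoop prods mn i js
    else vfcJLoop prods mn i js

-- 'for i in range(0, n)' loop
def vfcILoop (prods : List (List Char)) (mn : Nat) : List Nat → Bool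
  | [] => false
  | i :: is => if vfcJLoop prods mn i (List.range prods.length) then true else vfcILoop prods mn is

-- outer 'for no_terminal, producciones in gramatica.items()' loop; the Python dict's
-- 'gramatica[no_terminal]' always equals 'producciones' (dict keys are unique), so the
-- port binds the value once. Productions are strings; str(prod[k]) is that character.
def ver_factor_comun : List (String × List String) → Bool
  | [] => false
  | (_, producciones) :: rest =>
    let prods := producciones.map String.toList
    let n := prods.length
    if n > 0 then
      let mn := prods.foldl (fun m p => if p.length < m then p.length else m) (prods.getD 0 []).length
      if n > 1 then
        if vfcILoop prods mn (List.range n) then true else ver_factor_comun rest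
      else ver_factor_comun rest
    else ver_factor_comun rest

-- ===== PORT B =====
-- 'for p in producciones: if p[0] in seen: return True; seen.add(p[0])' — every p is
-- non-empty (guarded by all(producciones)), so getD's default is never read.
def vfcSeen (seen : PySem.Set Char) : List (List Char) → Bool
  | [] => false
  | p :: ps =>
    let c := p.getD 0 ' '
    if PySem.Set.contains seen c then true else vfcSeen (PySem.Set.add seen c) ps

def ver_factor_comun_alt : List (String × List String) → Bool
  | [] => false
  | (_, producciones) :: rest =>
    let prods := producciones.map String.toList
    if decide (1 < prods.length) && prods.all (fun p => !p.isEmpty) then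
      if vfcSeen PySem.Set.empty prods then true else ver_factor_comun_alt rest
    else ver_factor_comun_alt rest

-- ===== PRECONDITION & SPEC =====
def Spec_ver_factor_comun (gramatica : List (String × List String)) (out : Bool) : Prop := out = ver_factor_comun_alt gramatica
instance (gramatica : List (String × List String)) (out : Bool) : Decidable (Spec_ver_factor_comun gramatica out) := by unfold Spec_ver_factor_comun; infer_instance

-- ===== CLAIM (what is proved, stated in full; the proofs are below) =====
def Claim_equal_ver_factor_comun : Prop := ∀ (gramatica : List (String × List String)), Dom_ver_factor_comun gramatica → Spec_ver_factor_comun gramatica (ver_factor_comun gramatica)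

-- ===== LEMMAS AND PROOFS =====

-- once the two growing factors differ (at equal length), they differ forever
theorem vfcKLoop_ne (pi pj : List Char) : ∀ (ks : List Nat) (f1 f2 : List Char),
    f1.length = f2.length → f1 ≠ f2 → vfcKLoop pi pj ks f1 f2 = false := by
  intro ks
  induction ks with
  | nil => intro _ _ _ _; rfl
  | cons k ks ih =>
    intro f1 f2 hlen hne
    simp only [vfcKLoop]
    have hne' : f1 ++ [pi.getD k ' '] ≠ f2 ++ [pj.getD k ' '] := by
      intro h
      exact hne (List.append_inj' h rfl).1
    rw [if_neg hne']
    exact ih _ _ (by simp [hlen]) hne'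

-- the k-loop fires exactly when min > 0 and the two first characters agree
theorem vfcKLoop_range (pi pj : List Char) (mn : Nat) :
    vfcKLoop pi pj (List.range mn) [] [] =
      (decide (0 < mn) && decide (pi.getD 0 ' ' = pj.getD 0 ' ')) := by
  cases mn with
  | zero => rfl
  | succ m =>
    rw [List.range_succ_eq_map]
    simp only [vfcKLoop, List.nil_append]
    by_cases h : pi.getD 0 ' ' = pj.getD 0 ' '
    · rw [if_pos (show [pi.getD 0 ' '] = [pj.getD 0 ' '] by rw [h]),
        decide_eq_true h, Bool.and_true]
      simp
    · have hne : [pi.getD 0 ' '] ≠ [pj.getD 0 ' '] := by simpa using h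
      rw [if_neg hne,
        vfcKLoop_ne pi pj (List.map Nat.succ (List.range m)) [pi.getD 0 ' '] [pj.getD 0 ' '] rfl hne,
        decide_eq_false h, Bool.and_false]

theorem vfcJLoop_iff (prods : List (List Char)) (mn i : Nat) (js : List Nat) :
    vfcJLoop prods mn i js = true ↔
      ∃ j ∈ js, i ≠ j ∧
        vfcKLoop (prods.getD i []) (prods.getD j []) (List.range mn) [] [] = true := by
  induction js with
  | nil => simp [vfcJLoop]
  | cons j js ih =>
    simp only [vfcJLoop]
    by_cases hij : i ≠ j
    · rw [if_pos hij]
      by_cases hk : vfcKLoop (prods.getD i []) (prods.getD j []) (List.range mn) [] [] = true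
      · rw [if_pos hk]
        simp only [true_iff]
        exact ⟨j, by simp, hij, hk⟩
      · rw [if_neg hk, ih]
        constructor
        · rintro ⟨j', hj', h⟩; exact ⟨j', List.mem_cons_of_mem _ hj', h⟩
        · rintro ⟨j', hj', hne, h⟩
          rcases List.mem_cons.mp hj' with rfl | hj''
          · exact absurd h hk
          · exact ⟨j', hj'', hne, h⟩
    · rw [if_neg hij]
      have hij' : i = j := not_not.mp hij
      subst hij'
      rw [ih]
      constructor
      · rintro ⟨j', hj', h⟩; exact ⟨j', List.mem_cons_of_mem _ hj', h⟩
      · rintro ⟨j', hj', hne, h⟩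
        rcases List.mem_cons.mp hj' with rfl | hj''
        · exact absurd rfl hne
        · exact ⟨j', hj'', hne, h⟩

theorem vfcILoop_iff (prods : List (List Char)) (mn : Nat) (is : List Nat) :
    vfcILoop prods mn is = true ↔
      ∃ i ∈ is, vfcJLoop prods mn i (List.range prods.length) = true := by
  induction is with
  | nil => simp [vfcILoop]
  | cons i is ih =>
    simp only [vfcILoop]
    by_cases h : vfcJLoop prods mn i (List.range prods.length) = true
    · simp [h]
    · simp [h, ih]

-- A's running minimum is positive iff the seed and every scanned length are positive
theorem foldMin_pos (l : List (List Char)) : ∀ m0 : Nat,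
    0 < l.foldl (fun m p => if p.length < m then p.length else m) m0 ↔
      0 < m0 ∧ ∀ p ∈ l, 0 < p.length := by
  induction l with
  | nil => simp
  | cons p l ih =>
    intro m0
    simp only [List.foldl_cons, ih, List.mem_cons, forall_eq_or_imp]
    split_ifs with h
    · constructor
      · rintro ⟨h1, h2⟩; exact ⟨by omega, h1, h2⟩
      · rintro ⟨h1, h2, h3⟩; exact ⟨h2, h3⟩
    · constructor
      · rintro ⟨h1, h2⟩; exact ⟨h1, by omega, h2⟩
      · rintro ⟨h1, h2, h3⟩; exact ⟨h1, h3⟩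

-- B's seen-set loop finds exactly a duplicate among the first characters (or one already seen)
theorem vfcSeen_iff (l : List (List Char)) : ∀ seen : PySem.Set Char,
    vfcSeen seen l = true ↔
      ¬ (l.map (fun p => p.getD 0 ' ')).Nodup ∨ ∃ p ∈ l, p.getD 0 ' ' ∈ seen := by
  induction l with
  | nil => simp [vfcSeen, List.Nodup]
  | cons p ps ih =>
    intro seen
    simp only [vfcSeen, List.map_cons, List.nodup_cons, List.mem_cons, List.mem_map]
    by_cases hc : PySem.Set.contains seen (p.getD 0 ' ') = true
    · rw [if_pos hc]
      have := (PySem.Set.contains_iff seen (p.getD 0 ' ')).mp hc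
      simp only [true_iff]
      exact Or.inr ⟨p, Or.inl rfl, this⟩
    · rw [if_neg hc]
      have hnm : p.getD 0 ' ' ∉ seen := fun h => hc ((PySem.Set.contains_iff _ _).mpr h)
      rw [ih]
      constructor
      · rintro (hnd | ⟨q, hq, hmem⟩)
        · exact Or.inl (fun h => hnd h.2)
        · rw [PySem.Set.mem_add] at hmem
          rcases hmem with h | h
          · exact Or.inr ⟨q, Or.inr hq, h⟩
          · exact Or.inl (fun hn => hn.1 ⟨q, hq, h⟩)
      · rintro (hnd | ⟨q, hq | hq, hmem⟩)
        · by_cases hin : p.getD 0 ' ' ∈ ps.map (fun p => p.getD 0 ' ')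
          · rcases List.mem_map.mp hin with ⟨q, hq, hqe⟩
            exact Or.inr ⟨q, hq, by rw [PySem.Set.mem_add]; exact Or.inr hqe⟩
          · left; intro hnd'; exact hnd ⟨fun h => hin (List.mem_map.mpr h), hnd'⟩
        · subst hq; exact absurd hmem hnm
        · exact Or.inr ⟨q, hq, by rw [PySem.Set.mem_add]; exact Or.inl hmem⟩

-- a list is not Nodup iff two distinct positions carry the same value (via nodup_iff_injective_get)
theorem not_nodup_iff_pair (l : List Char) :
    ¬ l.Nodup ↔ ∃ i j, i < l.length ∧ j < l.length ∧ i ≠ j ∧ l.getD i ' ' = l.getD j ' ' := by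
  rw [List.nodup_iff_injective_get]
  constructor
  · intro h
    simp only [Function.Injective, not_forall] at h
    obtain ⟨⟨i, hi⟩, ⟨j, hj⟩, hget, hne⟩ := h
    refine ⟨i, j, hi, hj, fun h => hne (by simpa using h), ?_⟩
    rw [List.getD_eq_getElem _ _ hi, List.getD_eq_getElem _ _ hj]
    simpa [List.get_eq_getElem] using hget
  · rintro ⟨i, j, hi, hj, hne, heq⟩ hinj
    rw [List.getD_eq_getElem _ _ hi, List.getD_eq_getElem _ _ hj] at heq
    have := hinj (a₁ := ⟨i, hi⟩) (a₂ := ⟨j, hj⟩) (by simpa [List.get_eq_getElem] using heq)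
    exact hne (by simpa using this)

-- per-group equivalence: A's triple loop = B's guard + seen loop, once n > 1
theorem group_eq (prods : List (List Char)) (hn : 1 < prods.length) :
    vfcILoop prods (prods.foldl (fun m p => if p.length < m then p.length else m)
        (prods.getD 0 []).length) (List.range prods.length) =
      (prods.all (fun p => !p.isEmpty) && vfcSeen PySem.Set.empty prods) := by
  set mn := prods.foldl (fun m p => if p.length < m then p.length else m)
      (prods.getD 0 []).length with hmn
  have hpos : 0 < mn ↔ ∀ p ∈ prods, 0 < p.length := by
    rw [hmn, foldMin_pos]
    have h0 : prods.getD 0 [] ∈ prods := by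
      cases prods with
      | nil => simp at hn
      | cons p ps => simp [List.getD]
    constructor
    · exact fun h => h.2
    · exact fun h => ⟨h _ h0, h⟩
  have hall : (prods.all (fun p => !p.isEmpty) = true) ↔ ∀ p ∈ prods, 0 < p.length := by
    simp [List.all_eq_true, List.length_pos_iff]
  have hseen : (vfcSeen PySem.Set.empty prods = true) ↔
      ¬ (prods.map (fun p => p.getD 0 ' ')).Nodup := by
    rw [vfcSeen_iff]
    simp [PySem.Set.empty]
  have hhead : ∀ i, i < prods.length →
      (prods.getD i []).getD 0 ' ' = (prods.map (fun p => p.getD 0 ' ')).getD i ' ' := by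
    intro i hi
    have h1 : prods.getD i [] = prods[i] := List.getD_eq_getElem _ _ hi
    have h2 : (prods.map (fun p => p.getD 0 ' ')).getD i ' ' = prods[i].getD 0 ' ' := by
      rw [List.getD_eq_getElem _ _ (by simpa using hi), List.getElem_map]
    rw [h1, h2]
  apply Bool.eq_iff_iff.mpr
  rw [vfcILoop_iff]
  simp only [Bool.and_eq_true, hall, hseen,
    not_nodup_iff_pair ((prods.map (fun p => p.getD 0 ' ')))]
  constructor
  · rintro ⟨i, hi, hj⟩
    rw [vfcJLoop_iff] at hj
    obtain ⟨j, hjmem, hij, hk⟩ := hj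
    rw [vfcKLoop_range] at hk
    simp only [Bool.and_eq_true, decide_eq_true_eq] at hk
    obtain ⟨hmnpos, heq⟩ := hk
    have hi' := List.mem_range.mp hi
    have hj' := List.mem_range.mp hjmem
    refine ⟨hpos.mp hmnpos, i, j, by simpa using hi', by simpa using hj', hij, ?_⟩
    rw [← hhead i hi', ← hhead j hj']
    exact heq
  · rintro ⟨hlen, i, j, hi, hj, hij, heq⟩
    have hi' : i < prods.length := by simpa using hi
    have hj' : j < prods.length := by simpa using hj
    refine ⟨i, List.mem_range.mpr hi', ?_⟩
    rw [vfcJLoop_iff]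
    refine ⟨j, List.mem_range.mpr hj', hij, ?_⟩
    rw [vfcKLoop_range]
    simp only [Bool.and_eq_true, decide_eq_true_eq]
    exact ⟨hpos.mpr hlen, by rw [hhead i hi', hhead j hj']; exact heq⟩

-- ===== VERDICT (by name: the statement is the Claim_ definition above) =====
theorem ver_factor_comun_spec : Claim_equal_ver_factor_comun := by
  intro gramatica _
  show ver_factor_comun gramatica = ver_factor_comun_alt gramatica
  clear ‹Dom_ver_factor_comun gramatica›
  induction gramatica with
  | nil => rfl
  | cons e rest ih =>
    obtain ⟨nt, producciones⟩ := e
    simp only [ver_factor_comun, ver_factor_comun_alt]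
    set prods := producciones.map String.toList with hprods
    by_cases h1 : 1 < prods.length
    · rw [if_pos (show prods.length > 0 by omega), if_pos h1, group_eq prods h1]
      by_cases hall : prods.all (fun p => !p.isEmpty) = true
      · have hg : (decide (1 < prods.length) && prods.all (fun p => !p.isEmpty)) = true := by
          rw [hall, decide_eq_true h1, Bool.true_and]
        rw [if_pos hg, hall, Bool.true_and]
        by_cases hs : vfcSeen PySem.Set.empty prods = true
        · rw [if_pos hs, if_pos hs]
        · rw [if_neg hs, if_neg hs]; exact ih
      · have hall' : prods.all (fun p => !p.isEmpty) = false := by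
          cases hb : prods.all (fun p => !p.isEmpty)
          · rfl
          · exact absurd hb hall
        rw [hall', Bool.false_and, Bool.and_false]
        rw [if_neg (show ¬ (false = true) by simp), if_neg (show ¬ (false = true) by simp)]
        exact ih
    · have hg : (decide (1 < prods.length) && prods.all (fun p => !p.isEmpty)) = false := by
        simp [h1]
      rw [hg]
      by_cases h0 : prods.length > 0
      · rw [if_pos h0, if_neg (show ¬ prods.length > 1 by omega),
          if_neg (show ¬ (false = true) by simp)]
        exact ih
      · rw [if_neg h0, if_neg (show ¬ (false = true) by simp)]
        exact ih
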